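-- pv_equiv track=rewrite | github.com/miblazej/PIE | compute_spread.py | base26tobase10
-- ===== SOURCE A (Python) =====
-- def base26tobase10(s):
--     s = s[::-1]
--     base10 = 0
--     power = 0
--     for i in range(len(s)):
--         base10 += (ord(s[i]) - 64) * 26 ** power
--         power += 1
--     return base10
-- ===== SOURCE B (Python) =====
-- def base26tobase10(s):
--     base10 = 0
--     for c in s:
--         base10 = base10 * 26 + (ord(c) - 64)
--     return base10
-- ===== Notes on version B (the rewrite author's own statement) =====
-- stated objective: faster
-- what changed: Replaces the reversal plus power-counter-and-exponentiation accumulation with a Horner multiply-accumulate pass over the string in natural order, eliminating the 26**power big-int exponentiation per character.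
import Mathlib
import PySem

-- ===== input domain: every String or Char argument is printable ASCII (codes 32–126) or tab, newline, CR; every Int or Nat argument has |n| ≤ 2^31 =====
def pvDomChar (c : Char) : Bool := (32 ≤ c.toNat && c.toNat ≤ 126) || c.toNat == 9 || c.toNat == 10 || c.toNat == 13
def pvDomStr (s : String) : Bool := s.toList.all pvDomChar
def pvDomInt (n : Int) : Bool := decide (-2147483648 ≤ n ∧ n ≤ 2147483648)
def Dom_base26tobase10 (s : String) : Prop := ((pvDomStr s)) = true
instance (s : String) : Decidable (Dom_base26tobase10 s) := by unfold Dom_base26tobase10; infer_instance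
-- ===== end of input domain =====

-- B differs from A by using Horner's multiply-accumulate pass in natural order instead of
-- reversing the string and summing (ord(c)-64) * 26**power with a power counter (objective: simpler).

-- ===== PORT A =====
-- loop over the reversed string, maintaining (base10, power) exactly as A does
def pvGoA : List Char → Int → Nat → Int
  | [], base10, _ => base10
  | c :: t, base10, power => pvGoA t (base10 + ((c.toNat : Int) - 64) * (26 : Int) ^ power) (power + 1)

def base26tobase10 (s : String) : Int := pvGoA s.toList.reverse 0 0

-- ===== PORT B =====
def base26tobase10_alt (s : String) : Int :=
  s.toList.foldl (fun base10 c => base10 * 26 + ((c.toNat : Int) - 64)) 0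

-- ===== PRECONDITION & SPEC =====
def Spec_base26tobase10 (s : String) (out : Int) : Prop := out = base26tobase10_alt s
instance (s : String) (out : Int) : Decidable (Spec_base26tobase10 s out) := by unfold Spec_base26tobase10; infer_instance

-- ===== CLAIM (what is proved, stated in full; the proofs are below) =====
def Claim_equal_base26tobase10 : Prop := ∀ (s : String), Dom_base26tobase10 s → Spec_base26tobase10 s (base26tobase10 s)

-- ===== LEMMAS AND PROOFS =====
def pvHorner (l : List Char) : Int :=
  l.foldl (fun base10 c => base10 * 26 + ((c.toNat : Int) - 64)) 0

theorem pvHorner_append_singleton (l : List Char) (c : Char) :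
    pvHorner (l ++ [c]) = pvHorner l * 26 + ((c.toNat : Int) - 64) := by
  simp [pvHorner, List.foldl_append]

theorem pvGoA_eq (l : List Char) : ∀ (b : Int) (p : Nat),
    pvGoA l b p = b + (26 : Int) ^ p * pvHorner l.reverse := by
  induction l with
  | nil => intro b p; simp [pvGoA, pvHorner]
  | cons c t ih =>
    intro b p
    simp only [pvGoA, ih, List.reverse_cons, pvHorner_append_singleton, pow_succ]
    ring

-- ===== VERDICT (by name: the statement is the Claim_ definition above) =====
theorem base26tobase10_spec : Claim_equal_base26tobase10 := by
  intro s _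
  show base26tobase10 s = base26tobase10_alt s
  simp [base26tobase10, base26tobase10_alt, pvGoA_eq, pvHorner]
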